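-- pv_equiv track=rewrite | github.com/AustinTSchaffer/DailyProgrammer | AdventOfCode/2022/day_18/sln.py | part_1
-- ===== SOURCE A (Python) =====
-- def generate_faces(voxel: tuple[int, int, int]):
--     x, y, z = voxel
--     fbl, fbr, ftl, ftr, bbl, bbr, btl, btr = (
--         (x, y, z),
--         (x + 1, y, z),
--         (x, y + 1, z),
--         (x + 1, y + 1, z),
--         (x, y, z + 1),
--         (x + 1, y, z + 1),
--         (x, y + 1, z + 1),
--         (x + 1, y + 1, z + 1),
--     )
--
--     # Front
--     yield (fbl, ftl, ftr, fbr)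
--
--     # Back
--     yield (bbl, btl, btr, bbr)
--
--     # Bottom
--     yield (fbl, bbl, bbr, fbr)
--
--     # Top
--     yield (ftl, btl, btr, ftr)
--
--     # Left
--     yield (fbl, ftl, btl, bbl)
--
--     # Right
--     yield (fbr, ftr, btr, bbr)
--
-- def part_1(input: list[tuple[int, int, int]]):
--     unobscured_faces = set()
--     obscured_faces = set()
--     for voxel in input:
--         for face in generate_faces(voxel):
--             if face in obscured_faces:
--                 ...
--             elif face in unobscured_faces:
--                 unobscured_faces.remove(face)
--                 obscured_faces.add(face)
--             else:
--                 unobscured_faces.add(face)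
--
--     return unobscured_faces
-- ===== SOURCE B (Python) =====
-- def faces_of(voxel):
--     x, y, z = voxel
--     return [
--         ((x, y, z), (x, y + 1, z), (x + 1, y + 1, z), (x + 1, y, z)),
--         ((x, y, z + 1), (x, y + 1, z + 1), (x + 1, y + 1, z + 1), (x + 1, y, z + 1)),
--         ((x, y, z), (x, y, z + 1), (x + 1, y, z + 1), (x + 1, y, z)),
--         ((x, y + 1, z), (x, y + 1, z + 1), (x + 1, y + 1, z + 1), (x + 1, y + 1, z)),
--         ((x, y, z), (x, y + 1, z), (x, y + 1, z + 1), (x, y, z + 1)),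
--         ((x + 1, y, z), (x + 1, y + 1, z), (x + 1, y + 1, z + 1), (x + 1, y, z + 1)),
--     ]
--
-- def part_1(input: list[tuple[int, int, int]]):
--     all_faces = [face for voxel in input for face in faces_of(voxel)]
--     counts = {}
--     for face in all_faces:
--         counts[face] = counts.get(face, 0) + 1
--     return {face for face in all_faces if counts[face] == 1}
-- ===== Notes on version B (the rewrite author's own statement) =====
-- stated objective: simpler
-- what changed: B replaces A's incremental two-mutually-exclusive-set bookkeeping (with branch/remove/add per face) by three staged passes: flatten every voxel's faces into one list, build a frequency dict over it, then keep the faces whose count is exactly 1 in occurrence order.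
import Mathlib
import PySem

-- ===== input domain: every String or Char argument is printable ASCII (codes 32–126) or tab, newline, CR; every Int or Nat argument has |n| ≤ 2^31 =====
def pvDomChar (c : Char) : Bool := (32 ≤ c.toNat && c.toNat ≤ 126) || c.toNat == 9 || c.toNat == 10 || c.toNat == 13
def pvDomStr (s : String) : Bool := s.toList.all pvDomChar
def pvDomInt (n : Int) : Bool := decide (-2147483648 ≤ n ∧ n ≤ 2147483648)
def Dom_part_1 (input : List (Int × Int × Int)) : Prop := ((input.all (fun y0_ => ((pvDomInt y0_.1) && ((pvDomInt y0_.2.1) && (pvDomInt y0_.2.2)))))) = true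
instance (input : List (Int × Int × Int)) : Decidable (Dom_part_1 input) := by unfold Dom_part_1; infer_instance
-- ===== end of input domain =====

-- B replaces A's incremental two-set bookkeeping by three staged passes: flatten all faces into
-- one list, build a frequency dict over it, then keep the count-1 faces (objective: simpler; same cost).

abbrev PvFace := (Int × Int × Int) × (Int × Int × Int) × (Int × Int × Int) × (Int × Int × Int)

-- ===== PORT A =====
def generate_faces (voxel : Int × Int × Int) : List PvFace :=
  let x := voxel.1
  let y := voxel.2.1
  let z := voxel.2.2
  let fbl := (x, y, z)
  let fbr := (x + 1, y, z)
  let ftl := (x, y + 1, z)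
  let ftr := (x + 1, y + 1, z)
  let bbl := (x, y, z + 1)
  let bbr := (x + 1, y, z + 1)
  let btl := (x, y + 1, z + 1)
  let btr := (x + 1, y + 1, z + 1)
  [ (fbl, ftl, ftr, fbr),
    (bbl, btl, btr, bbr),
    (fbl, bbl, bbr, fbr),
    (ftl, btl, btr, ftr),
    (fbl, ftl, btl, bbl),
    (fbr, ftr, btr, bbr) ]

-- one iteration of A's inner loop body; 'remove' fires only on the branch where the face is a
-- member, so PySem.Set.discard is exact there
def part1Step (st : PySem.Set PvFace × PySem.Set PvFace) (face : PvFace) :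
    PySem.Set PvFace × PySem.Set PvFace :=
  if PySem.Set.contains st.2 face then st
  else if PySem.Set.contains st.1 face then
    (PySem.Set.discard st.1 face, PySem.Set.add st.2 face)
  else (PySem.Set.add st.1 face, st.2)

def part_1 (input : List (Int × Int × Int)) : List PvFace :=
  (input.foldl (fun st voxel => (generate_faces voxel).foldl part1Step st)
    (PySem.Set.empty, PySem.Set.empty)).1

-- ===== PORT B =====
def faces_of (voxel : Int × Int × Int) : List PvFace :=
  match voxel with
  | (x, y, z) =>
    [ ((x, y, z), (x, y + 1, z), (x + 1, y + 1, z), (x + 1, y, z)),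
      ((x, y, z + 1), (x, y + 1, z + 1), (x + 1, y + 1, z + 1), (x + 1, y, z + 1)),
      ((x, y, z), (x, y, z + 1), (x + 1, y, z + 1), (x + 1, y, z)),
      ((x, y + 1, z), (x, y + 1, z + 1), (x + 1, y + 1, z + 1), (x + 1, y + 1, z)),
      ((x, y, z), (x, y + 1, z), (x, y + 1, z + 1), (x, y, z + 1)),
      ((x + 1, y, z), (x + 1, y + 1, z), (x + 1, y + 1, z + 1), (x + 1, y, z + 1)) ]

def part_1_alt (input : List (Int × Int × Int)) : List PvFace :=
  let all_faces := input.flatMap faces_of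
  let counts : PySem.Dict PvFace Int :=
    all_faces.foldl (fun d face => d.insert face (d.getD face 0 + 1)) PySem.Dict.empty
  PySem.Set.ofList (all_faces.filter (fun f => counts.getD f 0 == 1))

-- ===== PRECONDITION & SPEC =====
def Spec_part_1 (input : List (Int × Int × Int)) (out : List ((Int × Int × Int) × (Int × Int × Int) × (Int × Int × Int) × (Int × Int × Int))) : Prop := out = part_1_alt input
instance (input : List (Int × Int × Int)) (out : List ((Int × Int × Int) × (Int × Int × Int) × (Int × Int × Int) × (Int × Int × Int))) : Decidable (Spec_part_1 input out) := by unfold Spec_part_1; infer_instance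

-- ===== CLAIM (what is proved, stated in full; the proofs are below) =====
def Claim_equal_part_1 : Prop := ∀ (input : List (Int × Int × Int)), Dom_part_1 input → Spec_part_1 input (part_1 input)

-- ===== LEMMAS AND PROOFS =====

theorem pv_faces_eq (voxel : Int × Int × Int) : generate_faces voxel = faces_of voxel := by
  obtain ⟨x, y, z⟩ := voxel
  rfl

theorem pv_discard_eq_filter {α : Type} [BEq α] (s : PySem.Set α) (x : α) :
    PySem.Set.discard s x = s.filter (fun y => !(y == x)) := rfl

theorem pv_foldl_flatMap {α β σ : Type} (g : α → List β) (f : σ → β → σ) :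
    ∀ (l : List α) (s : σ),
      l.foldl (fun s a => (g a).foldl f s) s = (l.flatMap g).foldl f s := by
  intro l
  induction l with
  | nil => intro s; rfl
  | cons a l ih =>
    intro s
    simp [List.flatMap_cons, List.foldl_append, ih]

-- A's loop invariant: the unobscured set is exactly the list of count-1 faces of the processed
-- prefix in first-occurrence order, and the obscured set holds exactly the count-≥2 faces
theorem pv_A_inv :
    ∀ (fs seen : List PvFace) (U O : List PvFace),
      U = (PySem.Set.ofList seen).filter (fun f => seen.count f == 1) →
      (∀ x : PvFace, x ∈ O ↔ 2 ≤ seen.count x) →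
      (fs.foldl part1Step (U, O)).1 =
        (PySem.Set.ofList (seen ++ fs)).filter (fun f => (seen ++ fs).count f == 1) := by
  intro fs
  induction fs with
  | nil => intro seen U O hU hO; simpa using hU
  | cons f fs ih =>
    intro seen U O hU hO
    have hcf : List.count f [f] = 1 := by simp
    rw [List.foldl_cons, List.append_cons seen f fs]
    by_cases h2 : 2 ≤ seen.count f
    · -- already obscured: state unchanged
      have hfO : f ∈ O := (hO f).mpr h2
      have hstep : part1Step (U, O) f = (U, O) := by
        simp [part1Step, hfO]
      rw [hstep]
      apply ih
      · rw [hU]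
        have hfmem : f ∈ PySem.Set.ofList seen := by
          rw [PySem.Set.mem_ofList]
          exact List.count_pos_iff.mp (by omega)
        rw [PySem.Set.ofList_append_singleton, PySem.Set.add_of_mem hfmem]
        apply List.filter_congr
        intro x _
        rw [Bool.eq_iff_iff]
        simp only [beq_iff_eq, List.count_append]
        by_cases hxf : x = f
        · subst hxf; omega
        · have hc0 : List.count x [f] = 0 := by
            simp only [List.count_singleton]
            exact if_neg (fun h => hxf ((beq_iff_eq.mp h).symm))
          omega
      · intro x
        rw [hO x]
        simp only [List.count_append]
        by_cases hxf : x = f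
        · subst hxf; omega
        · have hc0 : List.count x [f] = 0 := by
            simp only [List.count_singleton]
            exact if_neg (fun h => hxf ((beq_iff_eq.mp h).symm))
          omega
    · by_cases h1 : seen.count f = 1
      · -- second sighting: move from unobscured to obscured
        have hfU : f ∈ U := by
          rw [hU, List.mem_filter, PySem.Set.mem_ofList]
          refine ⟨List.count_pos_iff.mp (by omega), by simp [h1]⟩
        have hfO : f ∉ O := fun h => h2 ((hO f).mp h)
        have hstep : part1Step (U, O) f =
            (PySem.Set.discard U f, PySem.Set.add O f) := by
          simp [part1Step, hfO, hfU]
        rw [hstep]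
        apply ih
        · have hfmem : f ∈ PySem.Set.ofList seen := by
            rw [PySem.Set.mem_ofList]
            exact List.count_pos_iff.mp (by omega)
          rw [PySem.Set.ofList_append_singleton, PySem.Set.add_of_mem hfmem,
            pv_discard_eq_filter, hU, List.filter_filter]
          apply List.filter_congr
          intro x _
          rw [Bool.eq_iff_iff]
          simp only [Bool.and_eq_true, beq_iff_eq, Bool.not_eq_eq_eq_not, Bool.not_true,
            beq_eq_false_iff_ne, ne_eq, List.count_append]
          by_cases hxf : x = f
          · subst hxf
            constructor
            · rintro ⟨hne, _⟩; exact absurd rfl hne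
            · intro h; exact absurd h (by omega)
          · have hc0 : List.count x [f] = 0 := by
              simp only [List.count_singleton]
              exact if_neg (fun h => hxf ((beq_iff_eq.mp h).symm))
            constructor
            · rintro ⟨_, h⟩; omega
            · intro h; exact ⟨hxf, by omega⟩
        · intro x
          rw [PySem.Set.mem_add, hO x]
          simp only [List.count_append]
          by_cases hxf : x = f
          · subst hxf
            constructor
            · intro _; omega
            · intro _; exact Or.inr rfl
          · have hc0 : List.count x [f] = 0 := by
              simp only [List.count_singleton]
              exact if_neg (fun h => hxf ((beq_iff_eq.mp h).symm))
            constructor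
            · rintro (h | h)
              · omega
              · exact absurd h hxf
            · intro h; exact Or.inl (by omega)
      · -- first sighting: f is fresh (count 0)
        have hcnt0 : seen.count f = 0 := by omega
        have hfnotmem : f ∉ seen := by
          intro hmem
          have := List.count_pos_iff.mpr hmem
          omega
        have hfU : f ∉ U := by
          rw [hU]
          intro hmem
          have := (List.mem_filter.mp hmem).1
          rw [PySem.Set.mem_ofList] at this
          exact hfnotmem this
        have hfO : f ∉ O := fun h => h2 ((hO f).mp h)
        have hstep : part1Step (U, O) f = (PySem.Set.add U f, O) := by
          simp [part1Step, hfO, hfU]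
        rw [hstep]
        apply ih
        · rw [PySem.Set.add_of_not_mem hfU, PySem.Set.ofList_append_singleton,
            PySem.Set.add_of_not_mem (fun h => hfnotmem (by rwa [PySem.Set.mem_ofList] at h)),
            List.filter_append, hU]
          congr 1
          · apply List.filter_congr
            intro x hx
            rw [PySem.Set.mem_ofList] at hx
            have hxf : x ≠ f := fun h => hfnotmem (h ▸ hx)
            rw [Bool.eq_iff_iff]
            simp only [beq_iff_eq, List.count_append]
            have hc0 : List.count x [f] = 0 := by
              simp only [List.count_singleton]
              exact if_neg (fun h => hxf ((beq_iff_eq.mp h).symm))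
            omega
          · simp [hcnt0]
        · intro x
          rw [hO x]
          simp only [List.count_append]
          by_cases hxf : x = f
          · subst hxf; omega
          · have hc0 : List.count x [f] = 0 := by
              simp only [List.count_singleton]
              exact if_neg (fun h => hxf ((beq_iff_eq.mp h).symm))
            omega

-- filtering a list by a predicate that only count-1 elements satisfy gives the same result as
-- filtering its dedup (first occurrences): every kept element occurs exactly once anyway
theorem pv_filter_count_one {α : Type} [BEq α] [LawfulBEq α] (p : α → Bool) :
    ∀ (l : List α), (∀ x ∈ l, p x = true → l.count x = 1) →
      l.filter p = (PySem.Set.ofList l).filter p := by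
  intro l
  induction l using List.reverseRecOn with
  | nil => intro _; rfl
  | append_singleton l a ih =>
    intro h
    have hl : ∀ x ∈ l, p x = true → l.count x = 1 := by
      intro x hx hp
      have := h x (List.mem_append_left _ hx) hp
      have hpos : 0 < l.count x := List.count_pos_iff.mpr hx
      have hle : l.count x ≤ (l ++ [a]).count x := by
        rw [List.count_append]; omega
      omega
    rw [List.filter_append, PySem.Set.ofList_append_singleton, ih hl]
    by_cases hm : a ∈ PySem.Set.ofList l
    · rw [PySem.Set.add_of_mem hm]
      have hal : a ∈ l := (PySem.Set.mem_ofList _ _).mp hm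
      have hpa : p a = false := by
        by_contra hpa
        have hpa' : p a = true := by revert hpa; cases p a <;> simp
        have := h a (List.mem_append_right _ (by simp)) hpa'
        have : (l ++ [a]).count a = 1 := this
        rw [List.count_append, List.count_singleton] at this
        have hpos : 0 < l.count a := List.count_pos_iff.mpr hal
        simp at this
        omega
      simp [hpa]
    · rw [PySem.Set.add_of_not_mem hm, List.filter_append]

-- ===== VERDICT (by name: the statement is the Claim_ definition above) =====
theorem part_1_spec : Claim_equal_part_1 := by
  intro input _
  unfold Spec_part_1
  have hfl : input.flatMap generate_faces = input.flatMap faces_of := by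
    rw [show generate_faces = faces_of from funext pv_faces_eq]
  have hA : part_1 input =
      (PySem.Set.ofList (input.flatMap faces_of)).filter
        (fun f => (input.flatMap faces_of).count f == 1) := by
    unfold part_1
    rw [pv_foldl_flatMap, hfl]
    exact pv_A_inv (input.flatMap faces_of) [] [] [] (by simp) (by intro x; simp)
  have hB : part_1_alt input =
      (PySem.Set.ofList (input.flatMap faces_of)).filter
        (fun f => (input.flatMap faces_of).count f == 1) := by
    simp only [part_1_alt]
    rw [PySem.Dict.foldl_insert_getD_add_one_eq_counter]
    have hpred : ∀ f : PvFace,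
        ((PySem.Dict.counter (input.flatMap faces_of)).getD f 0 == (1 : Int)) =
          ((input.flatMap faces_of).count f == 1) := by
      intro f
      rw [PySem.Dict.getD_counter]
      rw [Bool.eq_iff_iff]
      simp
    have hp : (fun f : PvFace => (PySem.Dict.counter (input.flatMap faces_of)).getD f 0 == (1 : Int)) =
        (fun f => ((input.flatMap faces_of).count f == 1)) := funext hpred
    rw [hp]
    rw [pv_filter_count_one _ (input.flatMap faces_of)
      (by intro x _ hpx; simpa using hpx)]
    exact PySem.Set.ofList_eq_self_of_nodup _
      (List.Nodup.filter _ (PySem.Set.nodup_ofList _))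
  rw [hA, hB]
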